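-- pv_equiv track=rewrite | github.com/spacetelescope/crds | test/misc/datalvl.py | invert_cal_levels
-- ===== SOURCE A (Python) =====
-- def invert_cal_levels(cal_levels):
--     """Invert and return the cal_levels mapping.
--
--     >>> cal_levels = {
--     ...    "2A": [
--     ...        "dark",
--     ...        "gain",
--     ...        "ipc",
--     ...    ],
--     ...    "2B": [
--     ...        "area",
--     ...        "camera",
--     ...        "collimator",
--     ...    ],
--     ...    "3": [
--     ...        "distortion",
--     ...        "drizpars",
--     ...    ]
--     ... }
--
--     >>> inverted = invert_cal_levels(cal_levels)
--     >>> sorted(inverted.items())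
--     [('area', '2B'), ('camera', '2B'), ('collimator', '2B'), ('dark', '2A'), ('distortion', '3'), ('drizpars', '3'), ('gain', '2A'), ('ipc', '2A')]
--
--     >>> tricky_levels = {
--     ...    "1A" : [ "distortion"],
--     ...    "2A" : [ "distortion"],
--     ...    }
--     >>> sorted(invert_cal_levels(tricky_levels).items())
--     [('distortion', '1A')]
--     """
--     type_to_level = dict()
--     for level in cal_levels:
--         for type in cal_levels[level]:
--             if type in type_to_level:
--                 existing = type_to_level[type]
--                 if level < existing:
--                     type_to_level[type] = level
--             else:
--                 type_to_level[type] = level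
--     return type_to_level
-- ===== SOURCE B (Python) =====
-- def invert_cal_levels(cal_levels):
--     # Group-then-reduce: first collect, per type, every level containing it,
--     # then take the (string-)minimum level of each group.
--     groups = {}
--     for level, types in cal_levels.items():
--         for t in types:
--             groups.setdefault(t, []).append(level)
--     return {t: min(levels) for t, levels in groups.items()}
-- ===== Notes on version B (the rewrite author's own statement) =====
-- stated objective: alternative
-- what changed: Replaces A's fused running-min dict update with a two-pass group-then-reduce: first build a dict mapping each type to the list of all levels containing it, then take the string-minimum of each group.
import Mathlib
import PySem

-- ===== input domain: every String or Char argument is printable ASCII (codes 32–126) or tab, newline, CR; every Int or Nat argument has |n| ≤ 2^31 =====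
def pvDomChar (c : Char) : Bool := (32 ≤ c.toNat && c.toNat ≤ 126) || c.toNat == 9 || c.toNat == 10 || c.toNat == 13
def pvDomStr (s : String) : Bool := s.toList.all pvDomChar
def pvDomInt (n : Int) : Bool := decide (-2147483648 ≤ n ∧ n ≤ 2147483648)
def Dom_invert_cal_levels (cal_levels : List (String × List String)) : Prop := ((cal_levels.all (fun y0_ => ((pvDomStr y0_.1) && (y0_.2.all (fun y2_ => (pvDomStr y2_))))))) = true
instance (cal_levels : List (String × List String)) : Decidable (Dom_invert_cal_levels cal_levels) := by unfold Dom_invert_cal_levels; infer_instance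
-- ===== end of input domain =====

-- B replaces A's fused running-min update with a group-then-reduce pass (collect all levels
-- per type, then take the minimum of each group); same cost, different decomposition.

-- ===== PORT A =====
-- 'type in type_to_level' + 'type_to_level[type]' ported together as one get? match.
def invert_cal_levels (cal_levels : List (String × List String)) : List (String × String) :=
  (cal_levels.foldl
    (fun tl p =>
      p.2.foldl
        (fun tl t =>
          match tl.get? t with
          | some existing => if p.1 < existing then tl.insert t p.1 else tl
          | none => tl.insert t p.1)
        tl)
    PySem.Dict.empty).items

-- ===== PORT B =====
-- min(levels): PySem.List.min? with identity key; the "" default is unreachable (groups are nonempty).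
def pvMinStr (ls : List String) : String := (PySem.List.min? ls (fun y => y)).getD ""

def invert_cal_levels_alt (cal_levels : List (String × List String)) : List (String × String) :=
  (cal_levels.foldl
    (fun g p => p.2.foldl (fun g t => g.modify t [] (fun ls => ls ++ [p.1])) g)
    PySem.Dict.empty).items.map (fun q => (q.1, pvMinStr q.2))

-- ===== PRECONDITION & SPEC =====
-- Pre_ excludes association lists with duplicate level keys: the Python function takes a dict,
-- and a duplicate-key assoc list does not represent one (Python's dict construction silently
-- merges the duplicates), so neither port is a faithful model there.
def Pre_invert_cal_levels (cal_levels : List (String × List String)) : Prop :=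
  (cal_levels.map Prod.fst).Nodup
instance (cal_levels : List (String × List String)) : Decidable (Pre_invert_cal_levels cal_levels) := by unfold Pre_invert_cal_levels; infer_instance

def pvWitness_invert_cal_levels : (List (String × List String)) :=
  [("2A", ["dark", "gain"]), ("2B", ["area", "dark"]), ("3", ["drizpars"])]

def Spec_invert_cal_levels (cal_levels : List (String × List String)) (out : List (String × String)) : Prop := out = invert_cal_levels_alt cal_levels
instance (cal_levels : List (String × List String)) (out : List (String × String)) : Decidable (Spec_invert_cal_levels cal_levels out) := by unfold Spec_invert_cal_levels; infer_instance

-- ===== CLAIM (what is proved, stated in full; the proofs are below) =====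
def Claim_equal_invert_cal_levels : Prop := ∀ (cal_levels : List (String × List String)), Dom_invert_cal_levels cal_levels → Pre_invert_cal_levels cal_levels → Spec_invert_cal_levels cal_levels (invert_cal_levels cal_levels)

-- ===== LEMMAS AND PROOFS =====

-- B's grouping dict, viewed as A's running-min dict.
def pvToA (g : PySem.Dict String (List String)) : PySem.Dict String String :=
  PySem.Dict.mk (g.items.map (fun q => (q.1, pvMinStr q.2)))

-- loop invariant on B's grouping dict
def pvInv (g : PySem.Dict String (List String)) : Prop :=
  g.keys.Nodup ∧ ∀ k, g.contains k = true → g.getD k [] ≠ []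

theorem pvKeys_toA (g : PySem.Dict String (List String)) : (pvToA g).keys = g.keys := by
  simp [pvToA, PySem.Dict.keys, List.map_map]

theorem pvContains_toA (g : PySem.Dict String (List String)) (k : String) :
    (pvToA g).contains k = g.contains k := by
  rw [PySem.Dict.contains_eq_decide_mem_keys, PySem.Dict.contains_eq_decide_mem_keys, pvKeys_toA]

theorem pvGetD_toA (g : PySem.Dict String (List String)) (hnd : g.keys.Nodup) (k : String) :
    (pvToA g).getD k "" = pvMinStr (g.getD k []) := by
  cases h : g.get? k with
  | none =>
    have hc : g.contains k = false := (PySem.Dict.get?_eq_none_iff_contains g k).mp h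
    rw [PySem.Dict.getD_of_not_contains _ _ ((pvContains_toA g k).trans hc),
        PySem.Dict.getD_of_not_contains _ _ hc]
    rfl
  | some ls =>
    have hmem : (k, ls) ∈ g.items := PySem.Dict.mem_items_of_get?_eq_some g h
    have hmem' : (k, pvMinStr ls) ∈ (pvToA g).items := by
      simp only [pvToA]
      exact List.mem_map.mpr ⟨(k, ls), hmem, rfl⟩
    rw [PySem.Dict.getD_of_mem_items _ hmem' (by rw [pvKeys_toA]; exact hnd),
        PySem.Dict.getD_of_get?_eq_some _ _ h]

theorem pvIf_lt_min (a b : String) : (if a < b then a else b) = min b a := by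
  rcases le_total b a with h|h
  · rw [min_eq_left h]
    by_cases hlt : a < b
    · exact absurd h (not_le_of_gt hlt)
    · rw [if_neg hlt]
  · by_cases hlt : a < b
    · rw [if_pos hlt, min_eq_right hlt.le]
    · rw [if_neg hlt, (le_antisymm (le_of_not_gt hlt) h : b = a), min_self]

theorem pvMinStr_append (ls : List String) (l : String) (h : ls ≠ []) :
    pvMinStr (ls ++ [l]) = if l < pvMinStr ls then l else pvMinStr ls := by
  obtain ⟨x, t, rfl⟩ := List.exists_cons_of_ne_nil h
  rw [List.cons_append]
  simp only [pvMinStr, PySem.List.min?_id_cons, Option.getD_some, List.foldl_append,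
    List.foldl_cons, List.foldl_nil]
  exact (pvIf_lt_min l (t.foldl min x)).symm

theorem pvDict_eq (d d' : PySem.Dict String String) (hnd : d.keys.Nodup) (hnd' : d'.keys.Nodup)
    (hk : d.keys = d'.keys) (hg : ∀ k, d.getD k "" = d'.getD k "") : d = d' := by
  apply PySem.Dict.ext
  rw [PySem.Dict.items_eq_map_keys d hnd "", PySem.Dict.items_eq_map_keys d' hnd' "", hk]
  exact List.map_congr_left (fun k _ => by rw [hg])

-- one inner-loop step: A's running-min update mirrors B's group append
theorem pvStep (g : PySem.Dict String (List String)) (hInv : pvInv g) (l t : String) :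
    pvInv (g.modify t [] (fun ls => ls ++ [l])) ∧
    (match (pvToA g).get? t with
     | some existing => if l < existing then (pvToA g).insert t l else pvToA g
     | none => (pvToA g).insert t l)
      = pvToA (g.modify t [] (fun ls => ls ++ [l])) := by
  obtain ⟨hnd, hval⟩ := hInv
  have hkm : (g.modify t [] (fun ls => ls ++ [l])).keys
      = (g.insert t (g.getD t [] ++ [l])).keys := PySem.Dict.keys_modify g t [] _
  cases hc : g.contains t with
  | false =>
    have htk : t ∉ g.keys := by
      rw [PySem.Dict.contains_eq_decide_mem_keys] at hc
      exact of_decide_eq_false hc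
    have hkeys : (g.modify t [] (fun ls => ls ++ [l])).keys = g.keys ++ [t] := by
      rw [hkm, PySem.Dict.keys_insert_of_not_contains g _ hc]
    have hnd' : (g.modify t [] (fun ls => ls ++ [l])).keys.Nodup := by
      rw [hkeys]; simpa [List.nodup_append] using ⟨hnd, fun a ha he => htk (he ▸ ha)⟩
    refine ⟨⟨hnd', ?_⟩, ?_⟩
    · intro k hk
      rw [PySem.Dict.getD_modify]
      by_cases hkt : k = t
      · rw [if_pos hkt]; simp
      · rw [if_neg hkt]
        rw [PySem.Dict.contains_modify] at hk
        simp [hkt] at hk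
        exact hval k hk
    · have hgn : (pvToA g).get? t = none := by
        rw [PySem.Dict.get?_eq_none_iff_contains, pvContains_toA]; exact hc
      rw [hgn]
      refine pvDict_eq _ _ ?_ (by rw [pvKeys_toA]; exact hnd') ?_ ?_
      · rw [PySem.Dict.keys_insert_of_not_contains _ _ (by rw [pvContains_toA]; exact hc),
          pvKeys_toA]
        simpa [List.nodup_append] using ⟨hnd, fun a ha he => htk (he ▸ ha)⟩
      · rw [PySem.Dict.keys_insert_of_not_contains _ _ (by rw [pvContains_toA]; exact hc),
          pvKeys_toA, pvKeys_toA, hkeys]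
      · intro k
        rw [PySem.Dict.getD_insert, pvGetD_toA _ hnd' k, PySem.Dict.getD_modify]
        by_cases hkt : k = t
        · rw [if_pos hkt, if_pos hkt, PySem.Dict.getD_of_not_contains g _ hc]
          rfl
        · rw [if_neg hkt, if_neg hkt, pvGetD_toA g hnd k]
  | true =>
    have hkeys : (g.modify t [] (fun ls => ls ++ [l])).keys = g.keys := by
      rw [hkm, PySem.Dict.keys_insert_of_contains g _ hc]
    have hnd' : (g.modify t [] (fun ls => ls ++ [l])).keys.Nodup := by rw [hkeys]; exact hnd
    have hlsne : g.getD t [] ≠ [] := hval t hc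
    have hInv' : pvInv (g.modify t [] (fun ls => ls ++ [l])) := by
      refine ⟨hnd', ?_⟩
      intro k hk
      rw [PySem.Dict.getD_modify]
      by_cases hkt : k = t
      · rw [if_pos hkt]; simp
      · rw [if_neg hkt]
        rw [PySem.Dict.contains_modify] at hk
        simp [hkt] at hk
        exact hval k hk
    refine ⟨hInv', ?_⟩
    have hcs : (pvToA g).contains t = true := by rw [pvContains_toA]; exact hc
    obtain ⟨e, hge⟩ : ∃ e, (pvToA g).get? t = some e := by
      cases h : (pvToA g).get? t with
      | none => rw [(PySem.Dict.get?_eq_none_iff_contains _ t).mp h] at hcs; exact absurd hcs (by simp)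
      | some e => exact ⟨e, rfl⟩
    have he : e = pvMinStr (g.getD t []) := by
      rw [← PySem.Dict.getD_of_get?_eq_some _ "" hge, pvGetD_toA g hnd t]
    rw [hge]
    show (if l < e then (pvToA g).insert t l else pvToA g) = pvToA (g.modify t [] (fun ls => ls ++ [l]))
    refine pvDict_eq _ _ ?_ (by rw [pvKeys_toA]; exact hnd') ?_ ?_
    · by_cases hlt : l < e
      · rw [if_pos hlt, PySem.Dict.keys_insert_of_contains _ _ hcs, pvKeys_toA]; exact hnd
      · rw [if_neg hlt, pvKeys_toA]; exact hnd
    · by_cases hlt : l < e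
      · rw [if_pos hlt, PySem.Dict.keys_insert_of_contains _ _ hcs, pvKeys_toA, pvKeys_toA, hkeys]
      · rw [if_neg hlt, pvKeys_toA, pvKeys_toA, hkeys]
    · intro k
      rw [pvGetD_toA _ hnd' k, PySem.Dict.getD_modify]
      by_cases hkt : k = t
      · subst hkt
        rw [if_pos rfl, pvMinStr_append _ l hlsne, ← he]
        by_cases hlt : l < e
        · rw [if_pos hlt, if_pos hlt, PySem.Dict.getD_insert, if_pos rfl]
        · rw [if_neg hlt, if_neg hlt, pvGetD_toA g hnd k, he]
      · rw [if_neg hkt]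
        by_cases hlt : l < e
        · rw [if_pos hlt, PySem.Dict.getD_insert, if_neg hkt, pvGetD_toA g hnd k]
        · rw [if_neg hlt, pvGetD_toA g hnd k]

-- inner loop: one level's type list
theorem pvInner (types : List String) (l : String) :
    ∀ (g : PySem.Dict String (List String)), pvInv g →
    pvInv (types.foldl (fun g t => g.modify t [] (fun ls => ls ++ [l])) g) ∧
    types.foldl
        (fun tl t =>
          match tl.get? t with
          | some existing => if l < existing then tl.insert t l else tl
          | none => tl.insert t l)
        (pvToA g)
      = pvToA (types.foldl (fun g t => g.modify t [] (fun ls => ls ++ [l])) g) := by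
  induction types with
  | nil => intro g hInv; exact ⟨hInv, rfl⟩
  | cons t ts ih =>
    intro g hInv
    obtain ⟨hInv', hstep⟩ := pvStep g hInv l t
    simp only [List.foldl_cons]
    rw [hstep]
    exact ih _ hInv'

-- outer loop over the level list
theorem pvOuter (cal_levels : List (String × List String)) :
    ∀ (g : PySem.Dict String (List String)), pvInv g →
    pvInv (cal_levels.foldl (fun g p => p.2.foldl (fun g t => g.modify t [] (fun ls => ls ++ [p.1])) g) g) ∧
    cal_levels.foldl
        (fun tl p =>
          p.2.foldl
            (fun tl t =>
              match tl.get? t with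
              | some existing => if p.1 < existing then tl.insert t p.1 else tl
              | none => tl.insert t p.1)
            tl)
        (pvToA g)
      = pvToA (cal_levels.foldl (fun g p => p.2.foldl (fun g t => g.modify t [] (fun ls => ls ++ [p.1])) g) g) := by
  induction cal_levels with
  | nil => intro g hInv; exact ⟨hInv, rfl⟩
  | cons p ps ih =>
    intro g hInv
    obtain ⟨hInv', hstep⟩ := pvInner p.2 p.1 g hInv
    simp only [List.foldl_cons]
    rw [hstep]
    exact ih _ hInv'

theorem pvInv_empty : pvInv PySem.Dict.empty := by
  constructor
  · simp [PySem.Dict.keys_empty]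
  · intro k hk
    rw [PySem.Dict.contains_empty] at hk
    exact absurd hk (by simp)

-- ===== VERDICT (by name: the statement is the Claim_ definition above) =====
theorem invert_cal_levels_spec : Claim_equal_invert_cal_levels := by
  intro cal_levels _ _
  unfold Spec_invert_cal_levels invert_cal_levels invert_cal_levels_alt
  have h := pvOuter cal_levels PySem.Dict.empty pvInv_empty
  have hempty : pvToA PySem.Dict.empty = PySem.Dict.empty := rfl
  rw [hempty] at h
  rw [h.2]
  rfl
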